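-- pv_equiv track=rewrite | github.com/manickavasagarn/sip | main.py | generate_yearly_investments
-- ===== SOURCE A (Python) =====
-- def generate_yearly_investments(initial_amount, annual_increment, years, max_increment_year):
--     investments = []
--     current_amount = initial_amount
--
--     for year in range(1, years + 1):
--         investments.append(current_amount)
--
--         if year < max_increment_year:
--             current_amount += annual_increment
--
--     return investments
-- ===== SOURCE B (Python) =====
-- def generate_yearly_investments(initial_amount, annual_increment, years, max_increment_year):
--     return [initial_amount + annual_increment * max(0, min(i, max_increment_year - 1))
--             for i in range(years)]
-- ===== Notes on version B (the rewrite author's own statement) =====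
-- stated objective: simpler
-- what changed: Replaced the accumulator loop (running current_amount with a post-append capped increment) by a closed-form per-index comprehension: year i gets initial_amount + annual_increment * max(0, min(i, max_increment_year - 1)).
import Mathlib
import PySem

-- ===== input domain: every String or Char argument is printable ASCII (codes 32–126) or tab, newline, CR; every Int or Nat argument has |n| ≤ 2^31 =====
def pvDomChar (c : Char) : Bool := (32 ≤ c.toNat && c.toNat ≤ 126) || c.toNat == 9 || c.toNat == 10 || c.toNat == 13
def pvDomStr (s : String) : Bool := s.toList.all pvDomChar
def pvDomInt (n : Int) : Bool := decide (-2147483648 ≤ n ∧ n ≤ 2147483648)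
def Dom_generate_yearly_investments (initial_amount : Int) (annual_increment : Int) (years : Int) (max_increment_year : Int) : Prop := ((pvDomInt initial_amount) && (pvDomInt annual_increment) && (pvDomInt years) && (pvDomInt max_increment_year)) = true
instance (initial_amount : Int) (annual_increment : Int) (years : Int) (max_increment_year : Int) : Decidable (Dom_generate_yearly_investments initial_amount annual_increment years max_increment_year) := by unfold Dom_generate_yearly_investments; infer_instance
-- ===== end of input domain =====

-- B replaces A's running-accumulator loop by a closed-form per-index formula (objective: simpler).


-- ===== PORT A =====
-- for year in range(1, years+1): append current; if year < max_increment_year: current += annual_increment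
def generate_yearly_investments (initial_amount : Int) (annual_increment : Int) (years : Int) (max_increment_year : Int) : List Int :=
  ((PySem.List.pyRange 1 (years + 1) 1).foldl
    (fun (st : List Int × Int) year =>
      let investments := st.1 ++ [st.2]
      if year < max_increment_year then (investments, st.2 + annual_increment)
      else (investments, st.2))
    ([], initial_amount)).1

-- ===== PORT B =====
-- [initial_amount + annual_increment * max(0, min(i, max_increment_year - 1)) for i in range(years)]
def generate_yearly_investments_alt (initial_amount : Int) (annual_increment : Int) (years : Int) (max_increment_year : Int) : List Int :=
  (PySem.List.pyRange 0 years 1).map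
    (fun i => initial_amount + annual_increment * max 0 (min i (max_increment_year - 1)))

-- ===== PRECONDITION & SPEC =====
def Spec_generate_yearly_investments (initial_amount : Int) (annual_increment : Int) (years : Int) (max_increment_year : Int) (out : List Int) : Prop := out = generate_yearly_investments_alt initial_amount annual_increment years max_increment_year
instance (initial_amount : Int) (annual_increment : Int) (years : Int) (max_increment_year : Int) (out : List Int) : Decidable (Spec_generate_yearly_investments initial_amount annual_increment years max_increment_year out) := by unfold Spec_generate_yearly_investments; infer_instance

-- ===== CLAIM (what is proved, stated in full; the proofs are below) =====
def Claim_equal_generate_yearly_investments : Prop := ∀ (initial_amount : Int) (annual_increment : Int) (years : Int) (max_increment_year : Int), Dom_generate_yearly_investments initial_amount annual_increment years max_increment_year → Spec_generate_yearly_investments initial_amount annual_increment years max_increment_year (generate_yearly_investments initial_amount annual_increment years max_increment_year)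

-- ===== LEMMAS AND PROOFS =====

-- Invariant: after processing years 1..n, the list is B's list and the running
-- amount is initial + increment * (number of increments applied so far).
theorem gyi_fold_invariant (initial_amount annual_increment max_increment_year : Int) (n : Nat) :
    (PySem.List.pyRange 1 ((n : Int) + 1) 1).foldl
      (fun (st : List Int × Int) year =>
        let investments := st.1 ++ [st.2]
        if year < max_increment_year then (investments, st.2 + annual_increment)
        else (investments, st.2))
      ([], initial_amount)
    = ((PySem.List.pyRange 0 (n : Int) 1).map
        (fun i => initial_amount + annual_increment * max 0 (min i (max_increment_year - 1))),
       initial_amount + annual_increment * max 0 (min (n : Int) (max_increment_year - 1))) := by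
  induction n with
  | zero =>
      simp [PySem.List.pyRange_one_eq_nil]
  | succ k ih =>
      have h1 : PySem.List.pyRange 1 (((k : Int) + 1) + 1) 1
          = PySem.List.pyRange 1 ((k : Int) + 1) 1 ++ [(k : Int) + 1] := by
        exact PySem.List.pyRange_one_succ_right (by omega)
      have h2 : PySem.List.pyRange 0 ((k : Int) + 1) 1
          = PySem.List.pyRange 0 (k : Int) 1 ++ [(k : Int)] := by
        exact PySem.List.pyRange_one_succ_right (by omega)
      push_cast
      rw [h1, List.foldl_append, ih, h2]
      by_cases hlt : (k : Int) + 1 < max_increment_year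
      · have hm : max 0 (min ((k : Int) + 1) (max_increment_year - 1))
            = max 0 (min (k : Int) (max_increment_year - 1)) + 1 := by omega
        simp only [List.foldl_cons, List.foldl_nil, if_pos hlt, List.map_append, List.map_cons,
          List.map_nil, Prod.mk.injEq]
        exact ⟨trivial, by rw [hm]; ring⟩
      · have hm : max 0 (min ((k : Int) + 1) (max_increment_year - 1))
            = max 0 (min (k : Int) (max_increment_year - 1)) := by omega
        simp only [List.foldl_cons, List.foldl_nil, if_neg hlt, List.map_append, List.map_cons,
          List.map_nil, Prod.mk.injEq]
        exact ⟨trivial, by rw [hm]⟩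

-- ===== VERDICT (by name: the statement is the Claim_ definition above) =====
theorem generate_yearly_investments_spec : Claim_equal_generate_yearly_investments := by
  intro initial_amount annual_increment years max_increment_year _
  unfold Spec_generate_yearly_investments generate_yearly_investments generate_yearly_investments_alt
  by_cases hy : 0 ≤ years
  · have hcast : years = ((years.toNat : Int)) := by omega
    rw [hcast, gyi_fold_invariant]
  · rw [PySem.List.pyRange_one_eq_nil (by omega), PySem.List.pyRange_one_eq_nil (by omega)]
    simp
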